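-- pv_equiv track=rewrite | github.com/c-bracken/CT421-as1 | binpacking.py | correct_weights
-- ===== SOURCE A (Python) =====
-- def correct_weights(solution, excess, lack):
--     corrected = solution.copy()
--     for i in range(len(excess)):
--         for j in range(len(solution)):
--             if corrected[j] == excess[i]:
--                 corrected[j] = lack[i]
--                 break
--     return corrected
-- ===== SOURCE B (Python) =====
-- def correct_weights(solution, excess, lack):
--     # Index the positions of each value once (value -> ascending list of indices),
--     # then each replacement is a pop of the smallest index instead of a scan of solution.
--     pos = {}
--     for j, v in enumerate(solution):
--         if v in pos:
--             pos[v].append(j)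
--         else:
--             pos[v] = [j]
--     corrected = solution.copy()
--     for e, l in zip(excess, lack):
--         idxs = pos.get(e)
--         if idxs:
--             j = idxs.pop(0)
--             corrected[j] = l
--             if l in pos:
--                 _insort(pos[l], j)
--             else:
--                 pos[l] = [j]
--     return corrected
--
--
-- def _insort(lst, x):
--     i = 0
--     while i < len(lst) and lst[i] < x:
--         i += 1
--     lst.insert(i, x)
-- ===== Notes on version B (the rewrite author's own statement) =====
-- stated objective: faster
-- what changed: B builds a dict value->ascending index list once and performs each replacement by popping the smallest index (re-inserting it under the new value), instead of re-scanning the whole solution for every excess value.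
-- outside the precondition, e.g. on correct_weights([1], [2, 3], []): A returns [1], B returns [1]
import Mathlib
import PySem

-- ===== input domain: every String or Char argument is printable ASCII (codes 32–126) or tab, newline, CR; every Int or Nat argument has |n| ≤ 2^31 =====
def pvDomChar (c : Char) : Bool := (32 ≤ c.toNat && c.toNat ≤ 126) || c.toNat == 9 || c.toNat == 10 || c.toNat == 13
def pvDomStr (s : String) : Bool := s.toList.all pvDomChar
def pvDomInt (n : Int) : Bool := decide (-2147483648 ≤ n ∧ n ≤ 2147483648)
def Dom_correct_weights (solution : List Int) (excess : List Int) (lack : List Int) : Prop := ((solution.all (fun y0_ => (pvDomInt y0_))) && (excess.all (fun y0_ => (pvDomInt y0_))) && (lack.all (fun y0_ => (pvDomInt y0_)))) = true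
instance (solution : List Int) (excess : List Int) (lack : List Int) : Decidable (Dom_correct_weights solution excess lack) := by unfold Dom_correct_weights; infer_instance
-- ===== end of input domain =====

-- B replaces A's rescans of `solution` per excess value by a dict value→ascending index list
-- built once, popping the smallest index per replacement (objective: faster).

-- ===== PORT A =====
-- inner 'for j … if corrected[j] == e: corrected[j] = l; break' loop, as structural recursion
def replaceFirstA (corrected : List Int) (e l : Int) : List Int :=
  match corrected with
  | [] => []
  | x :: xs => if x = e then l :: xs else x :: replaceFirstA xs e l

-- 'lack[i]' is read with a default: Python reads it only on a match, and under
-- Pre_ (len excess ≤ len lack) every such read is in range, so this is exact on Pre_.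
def correct_weights (solution : List Int) (excess : List Int) (lack : List Int) : List Int :=
  (PySem.List.pyRange 0 (excess.length : Int) 1).foldl
    (fun corrected i =>
      replaceFirstA corrected (PySem.List.pyGetD excess i 0) (PySem.List.pyGetD lack i 0))
    solution

-- ===== PORT B =====
-- _insort from Source B (linear scan to the sorted position)
def insortB (lst : List Int) (x : Int) : List Int :=
  match lst with
  | [] => [x]
  | y :: ys => if y < x then y :: insortB ys x else x :: y :: ys

-- body of Source B's first loop: pos.setdefault-style append of index j under value v
def buildStepB (pos : PySem.Dict Int (List Int)) (jv : Int × Int) : PySem.Dict Int (List Int) :=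
  match pos.get? jv.2 with
  | some lst => pos.insert jv.2 (lst ++ [jv.1])
  | none => pos.insert jv.2 [jv.1]

def buildPosB (solution : List Int) : PySem.Dict Int (List Int) :=
  (PySem.List.enumerate solution 0).foldl buildStepB PySem.Dict.empty

-- body of Source B's second loop; 'pos.get(e)' is None or a list, both falsy when no index is left,
-- so the lookup is ported as getD with []
def stepB (st : List Int × PySem.Dict Int (List Int)) (p : Int × Int) :
    List Int × PySem.Dict Int (List Int) :=
  match st.2.getD p.1 [] with
  | [] => st
  | j :: rest =>
      let c' := st.1.set j.toNat p.2   -- j ≥ 0: every stored index comes from enumerate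
      let pos' := st.2.insert p.1 rest -- idxs.pop(0) mutates the list held in the dict
      let pos'' :=
        match pos'.get? p.2 with
        | some lst => pos'.insert p.2 (insortB lst j)
        | none => pos'.insert p.2 [j]
      (c', pos'')

def correct_weights_alt (solution : List Int) (excess : List Int) (lack : List Int) : List Int :=
  ((excess.zip lack).foldl stepB (solution, buildPosB solution)).1

-- ===== PRECONDITION & SPEC =====
-- Pre_ excludes inputs with excess longer than lack: there A raises IndexError as soon as one of
-- the unpaired excess values is (still) present in corrected; on such inputs where no unpaired
-- value ever matches A happens to return, and B returns the same value (see claim cites).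
def Pre_correct_weights (solution : List Int) (excess : List Int) (lack : List Int) : Prop :=
  excess.length ≤ lack.length
instance (solution : List Int) (excess : List Int) (lack : List Int) : Decidable (Pre_correct_weights solution excess lack) := by unfold Pre_correct_weights; infer_instance

def pvWitness_correct_weights : List Int × List Int × List Int := ([1, 2, 2], [2, 3], [9, 8])

def Spec_correct_weights (solution : List Int) (excess : List Int) (lack : List Int) (out : List Int) : Prop := out = correct_weights_alt solution excess lack
instance (solution : List Int) (excess : List Int) (lack : List Int) (out : List Int) : Decidable (Spec_correct_weights solution excess lack out) := by unfold Spec_correct_weights; infer_instance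

-- ===== CLAIM (what is proved, stated in full; the proofs are below) =====
def Claim_equal_correct_weights : Prop := ∀ (solution : List Int) (excess : List Int) (lack : List Int), Dom_correct_weights solution excess lack → Pre_correct_weights solution excess lack → Spec_correct_weights solution excess lack (correct_weights solution excess lack)

-- ===== LEMMAS AND PROOFS =====

-- ascending list of the (Int) positions ≥ offset k at which value v sits in c
def idxsFrom (k : Int) (c : List Int) (v : Int) : List Int :=
  match c with
  | [] => []
  | x :: xs => if x = v then k :: idxsFrom (k + 1) xs v else idxsFrom (k + 1) xs v

lemma le_of_mem_idxsFrom {k x v : Int} {c : List Int} (h : x ∈ idxsFrom k c v) : k ≤ x := by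
  induction c generalizing k with
  | nil => simp [idxsFrom] at h
  | cons y ys ih =>
      unfold idxsFrom at h
      split at h
      · rcases List.mem_cons.1 h with h | h
        · omega
        · have := ih h; omega
      · have := ih h; omega

lemma insortB_of_le {lst : List Int} {x : Int} (h : ∀ y ∈ lst, x ≤ y) :
    insortB lst x = x :: lst := by
  cases lst with
  | nil => rfl
  | cons y ys =>
      have : ¬ y < x := by have := h y (by simp); omega
      simp [insortB, this]

lemma insortB_cons_of_lt {y x : Int} (h : y < x) (ys : List Int) :
    insortB (y :: ys) x = y :: insortB ys x := by
  simp [insortB, h]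

lemma replaceFirstA_eq (c : List Int) (e l : Int) (k : Int) :
    replaceFirstA c e l =
      match idxsFrom k c e with
      | [] => c
      | j :: _ => c.set (j - k).toNat l := by
  induction c generalizing k with
  | nil => simp [replaceFirstA, idxsFrom]
  | cons x xs ih =>
      by_cases hx : x = e
      · simp [replaceFirstA, idxsFrom, hx]
      · have := ih (k + 1)
        cases hidx : idxsFrom (k + 1) xs e with
        | nil => simp [replaceFirstA, idxsFrom, hx, hidx, this]
        | cons j rest =>
            have hj : k + 1 ≤ j := le_of_mem_idxsFrom (v := e) (by rw [hidx]; simp)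
            have hnat : (j - k).toNat = (j - (k + 1)).toNat + 1 := by omega
            simp [replaceFirstA, idxsFrom, hx, hidx, this, hnat]

lemma idxsFrom_set (c : List Int) (e l v : Int) :
    ∀ (k j : Int) (rest : List Int), idxsFrom k c e = j :: rest →
    idxsFrom k (c.set (j - k).toNat l) v =
      (if v = l then insortB (if v = e then rest else idxsFrom k c v) j
       else if v = e then rest else idxsFrom k c v) := by
  induction c with
  | nil => intro k j rest h; simp [idxsFrom] at h
  | cons x xs ih =>
      intro k j rest h
      by_cases hx : x = e
      · -- head matches: j = k, rest = idxsFrom (k+1) xs e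
        rw [idxsFrom, if_pos hx] at h
        injection h with hj hrest
        subst hj; subst hrest; subst hx
        have hset : (x :: xs).set (k - k).toNat l = l :: xs := by
          simp
        rw [hset]
        have hT : ∀ w, idxsFrom k (w :: xs) v =
            if w = v then k :: idxsFrom (k + 1) xs v else idxsFrom (k + 1) xs v := fun w => rfl
        have hge : ∀ y ∈ idxsFrom (k + 1) xs v, k ≤ y := by
          intro y hy; have := le_of_mem_idxsFrom hy; omega
        rw [hT l, hT x]
        by_cases hvl : v = l <;> by_cases hve : v = x
        · rw [if_pos hvl.symm, if_pos hvl, if_pos hve, ← hve, insortB_of_le hge]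
        · have hxv : x ≠ v := fun hh => hve hh.symm
          rw [if_pos hvl.symm, if_pos hvl, if_neg hve, if_neg hxv, insortB_of_le hge]
        · rw [if_neg (fun hh => hvl hh.symm), if_neg hvl, if_pos hve, ← hve]
        · have hxv : x ≠ v := fun hh => hve hh.symm
          rw [if_neg (fun hh => hvl hh.symm), if_neg hvl, if_neg hve, if_neg hxv]
      · -- head does not match: recurse
        rw [idxsFrom, if_neg hx] at h
        have hj : k + 1 ≤ j := le_of_mem_idxsFrom (v := e) (by rw [h]; simp)
        have hnat : (j - k).toNat = (j - (k + 1)).toNat + 1 := by omega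
        have hih := ih (k + 1) j rest h
        have hset : (x :: xs).set (j - k).toNat l = x :: xs.set (j - (k + 1)).toNat l := by
          simp [hnat]
        rw [hset]
        by_cases hxv : x = v
        · subst hxv
          have hxl : x ≠ e := hx
          simp only [idxsFrom, if_true]
          by_cases hvl : x = l
          · rw [if_pos hvl, if_neg hxl, hih, if_pos hvl, if_neg hxl,
                insortB_cons_of_lt (show k < j by omega)]
          · rw [if_neg hvl, if_neg hxl, hih, if_neg hvl, if_neg hxl]
        · simp only [idxsFrom, if_neg hxv]
          exact hih

-- invariant: pos holds, for each value, exactly its ascending occurrence indices in c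
def InvB (pos : PySem.Dict Int (List Int)) (c : List Int) : Prop :=
  ∀ v, pos.getD v [] = idxsFrom 0 c v

lemma buildStepB_getD (pos : PySem.Dict Int (List Int)) (jv : Int × Int) (v : Int) :
    (buildStepB pos jv).getD v [] =
      if v = jv.2 then pos.getD v [] ++ [jv.1] else pos.getD v [] := by
  unfold buildStepB
  cases hg : pos.get? jv.2 with
  | some lst =>
      rw [PySem.Dict.getD_insert]
      by_cases hv : v = jv.2
      · subst hv; simp [PySem.Dict.getD_eq_get?_getD, hg]
      · simp [hv]
  | none =>
      rw [PySem.Dict.getD_insert]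
      by_cases hv : v = jv.2
      · subst hv; simp [PySem.Dict.getD_eq_get?_getD, hg]
      · simp [hv]

lemma buildPos_aux (xs : List Int) :
    ∀ (s : Int) (pos : PySem.Dict Int (List Int)) (v : Int),
      ((PySem.List.enumerate xs s).foldl buildStepB pos).getD v [] =
        pos.getD v [] ++ idxsFrom s xs v := by
  induction xs with
  | nil => intro s pos v; simp [PySem.List.enumerate_nil, idxsFrom]
  | cons x xs ih =>
      intro s pos v
      rw [PySem.List.enumerate_cons, List.foldl_cons, ih, buildStepB_getD]
      by_cases hv : v = x
      · subst hv; simp [idxsFrom]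
      · simp [idxsFrom, Ne.symm hv, hv]

lemma buildPos_inv (solution : List Int) : InvB (buildPosB solution) solution := by
  intro v
  unfold buildPosB
  rw [buildPos_aux]
  simp [PySem.Dict.getD_eq_get?_getD, PySem.Dict.empty, PySem.Dict.get?]

lemma stepB_spec {pos : PySem.Dict Int (List Int)} {c : List Int} (h : InvB pos c)
    (e l : Int) :
    (stepB (c, pos) (e, l)).1 = replaceFirstA c e l ∧
      InvB (stepB (c, pos) (e, l)).2 (stepB (c, pos) (e, l)).1 := by
  have hR := replaceFirstA_eq c e l 0
  cases hidx : pos.getD e [] with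
  | nil =>
      have hz : idxsFrom 0 c e = [] := by rw [← h e, hidx]
      constructor
      · simp [stepB, hidx, hR, hz]
      · simpa [stepB, hidx] using h
  | cons j rest =>
      have hz : idxsFrom 0 c e = j :: rest := by rw [← h e, hidx]
      have hj0 : (0 : Int) ≤ j := le_of_mem_idxsFrom (v := e) (by rw [hz]; simp)
      have hjk : (j - 0).toNat = j.toNat := by omega
      have hRval : replaceFirstA c e l = c.set j.toNat l := by
        rw [hR, hz]; show c.set (j - 0).toNat l = c.set j.toNat l; rw [hjk]
      have hfst : (stepB (c, pos) (e, l)).1 = replaceFirstA c e l := by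
        simp [stepB, hidx, hRval]
      refine ⟨hfst, ?_⟩
      rw [hfst, hRval]
      intro v
      have hset := idxsFrom_set c e l v 0 j rest hz
      rw [hjk] at hset
      rw [hset]
      -- compute the dict side
      have hpos' : ∀ w, (pos.insert e rest).getD w [] =
          if w = e then rest else pos.getD w [] := by
        intro w; rw [PySem.Dict.getD_insert]
      show (stepB (c, pos) (e, l)).2.getD v [] = _
      simp only [stepB, hidx]
      cases hg : (pos.insert e rest).get? l with
      | some lst =>
          have hlst : (pos.insert e rest).getD l [] = lst := by
            simp [PySem.Dict.getD_eq_get?_getD, hg]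
          rw [PySem.Dict.getD_insert, hpos' v]
          by_cases hvl : v = l
          · have harg : lst = (if v = e then rest else idxsFrom 0 c v) := by
              rw [← hlst, hpos' l, ← hvl, h v]
            rw [if_pos hvl, if_pos hvl, harg]
          · rw [if_neg hvl, if_neg hvl, h v]
      | none =>
          have hlst : (pos.insert e rest).getD l [] = [] := by
            simp [PySem.Dict.getD_eq_get?_getD, hg]
          rw [PySem.Dict.getD_insert, hpos' v]
          by_cases hvl : v = l
          · have harg : (if v = e then rest else idxsFrom 0 c v) = [] := by
              rw [← h v, ← hpos' v, hvl]; exact hlst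
            rw [if_pos hvl, if_pos hvl, harg]
            rfl
          · rw [if_neg hvl, if_neg hvl, h v]

lemma fold_equiv (pairs : List (Int × Int)) :
    ∀ (c : List Int) (pos : PySem.Dict Int (List Int)), InvB pos c →
      (pairs.foldl stepB (c, pos)).1 =
        pairs.foldl (fun c p => replaceFirstA c p.1 p.2) c := by
  induction pairs with
  | nil => intro c pos _; rfl
  | cons p ps ih =>
      intro c pos h
      obtain ⟨h1, h2⟩ := stepB_spec h p.1 p.2
      rw [List.foldl_cons, List.foldl_cons]
      have : stepB (c, pos) p = ((stepB (c, pos) p).1, (stepB (c, pos) p).2) := rfl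
      rw [this, ih _ _ (by simpa using h2), h1]

lemma idx_fold (E L : List Int) (hEL : E.length ≤ L.length) :
    ∀ (n s : Nat) (c : List Int), E.length - s = n →
      (PySem.List.pyRange (s : Int) (E.length : Int) 1).foldl
          (fun corrected i =>
            replaceFirstA corrected (PySem.List.pyGetD E i 0) (PySem.List.pyGetD L i 0)) c =
        ((E.drop s).zip (L.drop s)).foldl (fun c p => replaceFirstA c p.1 p.2) c := by
  intro n
  induction n with
  | zero =>
      intro s c hn
      have hs : E.length ≤ s := by omega
      rw [PySem.List.pyRange_one_eq_nil (by exact_mod_cast hs)]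
      rw [List.drop_eq_nil_of_le hs]
      simp
  | succ n ih =>
      intro s c hn
      have hs : s < E.length := by omega
      have hsL : s < L.length := by omega
      rw [PySem.List.pyRange_one_cons (by exact_mod_cast hs), List.foldl_cons]
      have hE : PySem.List.pyGetD E (s : Int) 0 = E[s] := by
        rw [PySem.List.pyGetD_natCast]; exact List.getD_eq_getElem E 0 hs
      have hL : PySem.List.pyGetD L (s : Int) 0 = L[s] := by
        rw [PySem.List.pyGetD_natCast]; exact List.getD_eq_getElem L 0 hsL
      have hdE : E.drop s = E[s] :: E.drop (s + 1) := List.drop_eq_getElem_cons hs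
      have hdL : L.drop s = L[s] :: L.drop (s + 1) := List.drop_eq_getElem_cons hsL
      rw [hE, hL, hdE, hdL]
      have hih := ih (s + 1) (replaceFirstA c E[s] L[s]) (by omega)
      rw [show (((s + 1 : Nat)) : Int) = ((s : Int) + 1) by push_cast; ring] at hih
      rw [hih, List.zip_cons_cons, List.foldl_cons]

-- ===== VERDICT (by name: the statement is the Claim_ definition above) =====
theorem correct_weights_spec : Claim_equal_correct_weights := by
  intro solution excess lack _ hpre
  show correct_weights solution excess lack = correct_weights_alt solution excess lack
  unfold correct_weights correct_weights_alt
  have hfold := idx_fold excess lack hpre (excess.length - 0) 0 solution rfl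
  rw [show (((0 : Nat)) : Int) = (0 : Int) by norm_num, List.drop_zero, List.drop_zero] at hfold
  rw [hfold, fold_equiv _ _ _ (buildPos_inv solution)]
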